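-- pv_equiv track=rewrite | github.com/JoshGraham14/web-terminal | html_convert.py | replace_chars
-- ===== SOURCE A (Python) =====
-- def replace_chars(text_list):
--     new_list = []
--     for line in text_list:
--         line = line.replace('&', '&amp;')
--         line = line.replace(' ', '&nbsp;')
--         line = line.replace("'", '&apos;')
--         line = line.replace('"', '&quot;')
--         line = line.replace('\n', '')
--         line = '<p>' + line + '</p>'
--         new_list.append(line)
--     return new_list
-- ===== SOURCE B (Python) =====
-- _ESC = {'&': '&amp;', ' ': '&nbsp;', "'": '&apos;', '"': '&quot;', '\n': ''}
--
-- def replace_chars(text_list):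
--     out = []
--     for line in text_list:
--         parts = ['<p>']
--         i, n = 0, len(line)
--         while i < n:
--             j = i
--             while j < n and line[j] not in _ESC:
--                 j += 1
--             parts.append(line[i:j])      # maximal run of untouched chars, copied as one slice
--             if j < n:
--                 parts.append(_ESC[line[j]])
--                 j += 1
--             i = j
--         parts.append('</p>')
--         out.append(''.join(parts))
--     return out
-- ===== Notes on version B (the rewrite author's own statement) =====
-- stated objective: alternative
-- what changed: Replaces A's five sequential full-string substitution passes per line with a single two-pointer run scanner that copies maximal runs of untouched characters as slices and emits an escape entity only at the special positions, joining the parts once.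
import Mathlib
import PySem

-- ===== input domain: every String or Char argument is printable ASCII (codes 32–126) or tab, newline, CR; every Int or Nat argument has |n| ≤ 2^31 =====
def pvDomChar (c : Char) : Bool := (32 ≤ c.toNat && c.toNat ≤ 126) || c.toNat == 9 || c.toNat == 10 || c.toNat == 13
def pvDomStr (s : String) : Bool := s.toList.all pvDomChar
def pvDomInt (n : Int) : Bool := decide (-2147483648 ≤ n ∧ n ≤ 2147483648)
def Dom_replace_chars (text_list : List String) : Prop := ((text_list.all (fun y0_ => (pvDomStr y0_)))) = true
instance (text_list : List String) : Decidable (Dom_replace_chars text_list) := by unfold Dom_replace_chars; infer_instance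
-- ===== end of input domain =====

-- B replaces A's five per-line full-string substitution passes with one two-pointer run scanner
-- that copies maximal runs of untouched characters and emits escapes at the special positions
-- (alternative decomposition; return value only).

-- ===== PORT A =====
-- A: for each line, five successive str.replace passes, then wrap in <p>…</p>, appended to an accumulator list.
def replace_chars_lineA (line : String) : String :=
  let l1 := PySem.Str.replace line "&" "&amp;"
  let l2 := PySem.Str.replace l1 " " "&nbsp;"
  let l3 := PySem.Str.replace l2 "'" "&apos;"
  let l4 := PySem.Str.replace l3 "\"" "&quot;"
  let l5 := PySem.Str.replace l4 "\n" ""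
  String.ofList ("<p>".toList ++ l5.toList ++ "</p>".toList)

def replace_chars (text_list : List String) : List String :=
  text_list.foldl (fun new_list line => new_list ++ [replace_chars_lineA line]) []

-- ===== PORT B =====
-- B's dict _ESC: the escape entity for a special character, none for ordinary characters.
def pvEscB (c : Char) : Option (List Char) :=
  if c = '&' then some "&amp;".toList
  else if c = ' ' then some "&nbsp;".toList
  else if c = '\'' then some "&apos;".toList
  else if c = '"' then some "&quot;".toList
  else if c = '\n' then some []
  else none

-- B's inner while loop: split off the maximal run of characters not in _ESC (the slice line[i:j]).
def pvRunB (cs : List Char) : List Char × List Char :=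
  match cs with
  | [] => ([], [])
  | c :: t =>
    match pvEscB c with
    | none => let p := pvRunB t; (c :: p.1, p.2)
    | some _ => ([], c :: t)

-- B's outer while loop (fuel = number of remaining iterations, bounded by the line length):
-- emit the run, then the escape for the special char found (if any), repeat on the rest.
def pvEmitGo : Nat -> List Char -> List Char
  | 0, _ => []
  | fuel + 1, cs =>
    let p := pvRunB cs
    match p.2 with
    | [] => p.1
    | c :: t => p.1 ++ (pvEscB c).getD [] ++ pvEmitGo fuel t

def pvEmitB (cs : List Char) : List Char := pvEmitGo (cs.length + 1) cs

def replace_chars_alt (text_list : List String) : List String :=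
  text_list.map (fun line =>
    String.ofList ("<p>".toList ++ pvEmitB line.toList ++ "</p>".toList))

-- ===== PRECONDITION & SPEC =====
def Spec_replace_chars (text_list : List String) (out : List String) : Prop := out = replace_chars_alt text_list
instance (text_list : List String) (out : List String) : Decidable (Spec_replace_chars text_list out) := by unfold Spec_replace_chars; infer_instance

-- ===== CLAIM (what is proved, stated in full; the proofs are below) =====
def Claim_equal_replace_chars : Prop := ∀ (text_list : List String), Dom_replace_chars text_list → Spec_replace_chars text_list (replace_chars text_list)

-- ===== LEMMAS AND PROOFS =====

-- proof-side per-character table: both programs compute this flatMap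
def pvTbl (c : Char) : List Char := ((pvEscB c).getD [c])

-- replace with a single-char pattern is a per-character flatMap
theorem replace_go_single (o : Char) (new : List Char) :
    ∀ (fuel : Nat) (l acc : List Char), l.length ≤ fuel →
      PySem.Chars.replace.go [o] new fuel l acc
        = acc.reverse ++ l.flatMap (fun c => if c = o then new else [c]) := by
  intro fuel
  induction fuel with
  | zero =>
    intro l acc h
    have : l = [] := List.length_eq_zero_iff.mp (Nat.le_zero.mp h)
    subst this
    simp [PySem.Chars.replace.go]
  | succ n ih =>
    intro l acc h
    cases l with
    | nil => simp [PySem.Chars.replace.go]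
    | cons c t =>
      by_cases hc : c = o
      · subst hc
        have hpre : List.isPrefixOf [c] (c :: t) = true := by
          simp [List.isPrefixOf]
        rw [PySem.Chars.replace.go]
        simp only [hpre, if_true]
        rw [ih _ _ (by simpa using Nat.le_of_succ_le_succ h)]
        simp
      · have hpre : List.isPrefixOf [o] (c :: t) = false := by
          simp [List.isPrefixOf]
          intro hco; exact absurd hco.symm hc
        rw [PySem.Chars.replace.go]
        simp only [hpre, Bool.false_eq_true, if_false]
        rw [ih t (c :: acc) (by simpa using Nat.le_of_succ_le_succ h)]
        simp [hc]

theorem replace_single (cs : List Char) (o : Char) (new : List Char) :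
    PySem.Chars.replace cs [o] new = cs.flatMap (fun c => if c = o then new else [c]) := by
  rw [PySem.Chars.replace]
  simp only [List.isEmpty_cons, Bool.false_eq_true, if_false]
  simpa using replace_go_single o new cs.length cs [] le_rfl

-- the five chained single-char substitutions collapse to the table pass
theorem chain_eq_table (cs : List Char) :
    ((((cs.flatMap (fun c => if c = '&' then "&amp;".toList else [c])).flatMap
        (fun c => if c = ' ' then "&nbsp;".toList else [c])).flatMap
        (fun c => if c = '\'' then "&apos;".toList else [c])).flatMap
        (fun c => if c = '"' then "&quot;".toList else [c])).flatMap
        (fun c => if c = '\n' then [] else [c])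
      = cs.flatMap pvTbl := by
  simp only [List.flatMap_assoc]
  apply List.flatMap_congr
  intro c _
  by_cases h1 : c = '&'
  · subst h1; decide
  by_cases h2 : c = ' '
  · subst h2; decide
  by_cases h3 : c = '\''
  · subst h3; decide
  by_cases h4 : c = '"'
  · subst h4; decide
  by_cases h5 : c = '\n'
  · subst h5; decide
  simp [pvTbl, pvEscB, h1, h2, h3, h4, h5]

theorem lineA_eq_table (line : String) :
    replace_chars_lineA line
      = String.ofList ("<p>".toList ++ line.toList.flatMap pvTbl ++ "</p>".toList) := by
  unfold replace_chars_lineA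
  have e1 : "&".toList = ['&'] := by decide
  have e2 : " ".toList = [' '] := by decide
  have e3 : "'".toList = ['\''] := by decide
  have e4 : "\"".toList = ['"'] := by decide
  have e5 : "\n".toList = ['\n'] := by decide
  have e6 : "".toList = ([] : List Char) := by decide
  simp only [PySem.Str.replace, String.toList_ofList, e1, e2, e3, e4, e5, e6]
  rw [replace_single, replace_single, replace_single, replace_single, replace_single]
  rw [chain_eq_table]

-- B's scanner computes the same table pass
theorem pvRunB_eq (cs : List Char) :
    pvRunB cs = (cs.takeWhile (fun c => (pvEscB c).isNone), cs.dropWhile (fun c => (pvEscB c).isNone)) := by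
  induction cs with
  | nil => simp [pvRunB]
  | cons c t ih =>
    cases h : pvEscB c with
    | none => simp [pvRunB, h, ih]
    | some e => simp [pvRunB, h]

theorem takeWhile_flatMap_tbl (cs : List Char) :
    (cs.takeWhile (fun c => (pvEscB c).isNone)).flatMap pvTbl
      = cs.takeWhile (fun c => (pvEscB c).isNone) := by
  have h : ∀ c ∈ cs.takeWhile (fun c => (pvEscB c).isNone), pvTbl c = [c] := by
    intro c hc
    have := List.mem_takeWhile_imp hc
    simp only [Option.isNone_iff_eq_none] at this
    simp [pvTbl, this]
  calc (cs.takeWhile (fun c => (pvEscB c).isNone)).flatMap pvTbl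
      = (cs.takeWhile (fun c => (pvEscB c).isNone)).flatMap (fun c => [c]) :=
        List.flatMap_congr h
    _ = _ := by simp

theorem pvEmitGo_eq_table : ∀ (fuel : Nat) (cs : List Char), cs.length < fuel →
    pvEmitGo fuel cs = cs.flatMap pvTbl := by
  intro fuel
  induction fuel with
  | zero => intro cs h; omega
  | succ n ih =>
    intro cs h
    rw [pvEmitGo]
    simp only [pvRunB_eq]
    cases hd : cs.dropWhile (fun c => (pvEscB c).isNone) with
    | nil =>
      have hcs : cs.takeWhile (fun c => (pvEscB c).isNone) = cs := by
        have h2 := List.takeWhile_append_dropWhile (p := fun c => (pvEscB c).isNone) (l := cs)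
        rw [hd] at h2; simpa using h2
      have h3 := takeWhile_flatMap_tbl cs
      rw [hcs] at h3
      show cs.takeWhile (fun c => (pvEscB c).isNone) = cs.flatMap pvTbl
      rw [hcs]; exact h3.symm
    | cons c t =>
      have hsplit : cs.takeWhile (fun c => (pvEscB c).isNone) ++ c :: t = cs := by
        have := List.takeWhile_append_dropWhile (p := fun c => (pvEscB c).isNone) (l := cs)
        rw [hd] at this; exact this
      have hc : (pvEscB c).isNone = false := by
        have := List.head_dropWhile_not (p := fun c => (pvEscB c).isNone) (l := cs) (by simp [hd])
        simpa [hd] using this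
      obtain ⟨e, he⟩ : ∃ e, pvEscB c = some e := by
        cases h' : pvEscB c with
        | none => rw [h'] at hc; simp at hc
        | some e => exact ⟨e, rfl⟩
      have hlen : t.length < n := by
        have := congrArg List.length hsplit
        simp at this
        omega
      show cs.takeWhile (fun c => (pvEscB c).isNone) ++ (pvEscB c).getD [] ++ pvEmitGo n t
            = cs.flatMap pvTbl
      rw [ih t hlen]
      conv_rhs => rw [← hsplit]
      simp only [List.flatMap_append, takeWhile_flatMap_tbl, List.flatMap_cons]
      simp [pvTbl, he]

theorem pvEmitB_eq_table (cs : List Char) : pvEmitB cs = cs.flatMap pvTbl := by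
  exact pvEmitGo_eq_table _ cs (by omega)

theorem foldl_append_singleton_map (f : String → String) (xs : List String) (acc : List String) :
    xs.foldl (fun new_list line => new_list ++ [f line]) acc = acc ++ xs.map f := by
  induction xs generalizing acc with
  | nil => simp
  | cons x t ih => simp [ih]

-- ===== VERDICT (by name: the statement is the Claim_ definition above) =====
theorem replace_chars_spec : Claim_equal_replace_chars := by
  intro text_list _
  unfold Spec_replace_chars replace_chars replace_chars_alt
  rw [foldl_append_singleton_map]
  simp only [List.nil_append]
  apply List.map_congr_left
  intro line _
  rw [lineA_eq_table, pvEmitB_eq_table]
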